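-- pv_equiv track=rewrite | github.com/stavethebees/002_advent_of_code | python/18/main.py | solve
-- ===== SOURCE A (Python) =====
-- def get_matching_bracket_pos(expression, pos):
--     _counter = 1
--     _pos = pos
--     _char = expression[pos]
--     if _char not in [")", "("]:
--         return pos # if this char isnt a bracket just return same pos
--
--     _oppositebracket = {"(":")", ")":"("}
--     _increment = {"(": 1, ")": -1}
--     while(_counter > 0):
--         _pos += _increment[_char]
--         if expression[_pos] == _char:
--             _counter += 1
--         elif expression[_pos] == _oppositebracket[_char]:
--             _counter -= 1
--     return _pos
--
-- def add_bracket(expression, pos, side):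
--     _bracket_pos = get_matching_bracket_pos(expression, pos)
--     _expression = list(expression)
--     if side == "right":
--         _bracket_pos += 1
--     _oppositebracket = {"left": "(", "right": ")"}
--     _expression.insert(_bracket_pos, _oppositebracket[side])
--     return _expression
--
-- def solve(expression, advanced=False):
--     _expression = list(expression)
--     _pos = 0
--     _length = len(expression)
--
--     while _pos < _length:
--         _char = _expression[_pos]
--         _length = len(_expression)
--         if advanced and _char == "*":
--             _pos += 1
--             continue
--         if _char == "+" or _char == "*":
--             _left_term = add_bracket(_expression, _pos - 1, "left")[:_pos + 1]
--             _right_term = add_bracket(_expression, _pos + 1, "right")[_pos + 1:]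
--             _expression = _left_term
--             _expression.extend(_char)
--             _expression.extend(_right_term)
--             _pos += 1
--         _pos += 1
--
--     return ''.join(_expression)
-- ===== SOURCE B (Python) =====
-- def solve(expression, advanced=False):
--     # Single recursive-descent pass: parse each term once, fold each operator
--     # chain with a (done, last) accumulator, build the output once.
--     s = expression
--     n = len(s)
--
--     def parse_term(i):
--         if i < n and s[i] == '(':
--             inner, j = parse_chain(i + 1)
--             return '(' + inner + ')', j + 1
--         return s[i], i + 1
--
--     def parse_chain(i):
--         done = []
--         last, i = parse_term(i)
--         while i < n and (s[i] == '+' or s[i] == '*'):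
--             op = s[i]
--             nxt, j = parse_term(i + 1)
--             if advanced and op == '*':
--                 done.append(last)
--                 done.append('*')
--                 last = nxt
--             else:
--                 last = '(' + last + op + nxt + ')'
--             i = j
--         return ''.join(done) + last, i
--
--     pieces = []
--     i = 0
--     while i < n:
--         out, i = parse_chain(i)
--         pieces.append(out)
--     return ''.join(pieces)
-- ===== Notes on version B (the rewrite author's own statement) =====
-- stated objective: alternative
-- what changed: Replaces A's in-place insert-and-rescan loop (which at every operator copies the whole list, inserts brackets and re-scans for matching parentheses) by a single recursive-descent pass that parses each term once, folds each operator chain with a (done, last) accumulator, and builds the output once.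
-- outside the precondition, e.g. on solve('a)b', False): A returns 'a)b', B returns 'a)b'; on solve('+a', False): A returns '++a)', B returns '+a'; on solve('(ab)', False): A returns '(ab)', B returns '(a))'
import Mathlib
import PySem

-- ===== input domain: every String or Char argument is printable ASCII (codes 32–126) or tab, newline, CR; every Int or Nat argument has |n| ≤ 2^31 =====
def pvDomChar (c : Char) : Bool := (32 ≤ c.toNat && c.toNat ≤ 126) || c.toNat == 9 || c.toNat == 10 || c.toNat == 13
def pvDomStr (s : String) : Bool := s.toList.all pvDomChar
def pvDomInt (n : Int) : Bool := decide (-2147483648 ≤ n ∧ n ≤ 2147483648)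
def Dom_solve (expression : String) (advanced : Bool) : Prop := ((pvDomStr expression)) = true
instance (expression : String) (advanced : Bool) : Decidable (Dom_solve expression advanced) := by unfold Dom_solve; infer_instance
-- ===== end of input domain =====

-- B replaces A's repeated copy-insert-and-rescan passes by one recursive-descent pass
-- that folds each operator chain with a (done, last) accumulator (objective: alternative).

-- ===== PORT A =====

-- inner `while(_counter > 0)` of get_matching_bracket_pos; fuel exhaustion (none) is
-- unreachable: the scan position moves monotonically, so Python either leaves the loop
-- or raises IndexError (= pyGet? none) within 2*len+4 steps.
def matchLoop (expr : List Char) (ch opp : Char) (inc : Int) : Nat → Int → Int → Option Int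
  | f, counter, pos =>
    if counter > 0 then
      match f with
      | 0 => none
      | f + 1 =>
        let pos' := pos + inc
        match PySem.List.pyGet? expr pos' with
        | none => none
        | some c =>
          let counter' := if c = ch then counter + 1 else if c = opp then counter - 1 else counter
          matchLoop expr ch opp inc f counter' pos'
    else some pos

def getMatchingBracketPos (expr : List Char) (pos : Int) : Option Int :=
  match PySem.List.pyGet? expr pos with
  | none => none
  | some c =>
    if ¬ (c = ')' ∨ c = '(') then some pos
    else
      let opp : Char := if c = '(' then ')' else '('
      let inc : Int := if c = '(' then 1 else -1
      matchLoop expr c opp inc (2 * expr.length + 4) 1 pos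

def addBracket (expr : List Char) (pos : Int) (side : String) : Option (List Char) :=
  match getMatchingBracketPos expr pos with
  | none => none
  | some bp =>
    let bp : Int := if side = "right" then bp + 1 else bp
    let br : Char := if side = "left" then '(' else ')'
    some (PySem.List.insert expr bp br)

-- the main `while _pos < _length` loop; fuel exhaustion (none) only happens where the
-- Python loop diverges or raises, i.e. outside Pre_solve.
def solveLoop (adv : Bool) : Nat → List Char → Int → Int → Option (List Char)
  | 0, expr, pos, len => if pos < len then none else some expr
  | f + 1, expr, pos, len =>
    if pos < len then
        match PySem.List.pyGet? expr pos with
        | none => none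
        | some ch =>
          let len2 : Int := expr.length
          if adv = true ∧ ch = '*' then
            solveLoop adv f expr (pos + 1) len2
          else if ch = '+' ∨ ch = '*' then
            match addBracket expr (pos - 1) "left" with
            | none => none
            | some l1 =>
              match addBracket expr (pos + 1) "right" with
              | none => none
              | some r1 =>
                let leftTerm := PySem.List.slice l1 none (some (pos + 1))
                let rightTerm := PySem.List.slice r1 (some (pos + 1)) none
                solveLoop adv f (leftTerm ++ [ch] ++ rightTerm) (pos + 2) len2
          else solveLoop adv f expr (pos + 1) len2
    else some expr

def solve (expression : String) (advanced : Bool) : String :=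
  match solveLoop advanced (3 * expression.toList.length + 8) expression.toList 0
      (expression.toList.length : Int) with
  | some r => String.ofList r
  | none => ""   -- only where the Python raises or diverges, excluded by Pre_solve

-- ===== PORT B =====

mutual
def parseTerm (s : List Char) (adv : Bool) : Nat → Nat → Option (List Char × Nat)
  | 0, _ => none
  | f + 1, i =>
    if i < s.length ∧ s[i]? = some '(' then
      match parseChain s adv f (i + 1) with
      | none => none
      | some (inner, j) => some ('(' :: (inner ++ [')']), j + 1)
    else
      match s[i]? with
      | none => none   -- s[i] raises IndexError, outside Pre_solve
      | some c => some ([c], i + 1)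

def parseChain (s : List Char) (adv : Bool) : Nat → Nat → Option (List Char × Nat)
  | 0, _ => none
  | f + 1, i =>
    match parseTerm s adv f i with
    | none => none
    | some (last, j) => chainLoop s adv f [] last j

def chainLoop (s : List Char) (adv : Bool) : Nat → List Char → List Char → Nat → Option (List Char × Nat)
  | 0, _, _, _ => none
  | f + 1, done, last, i =>
    if i < s.length ∧ (s[i]? = some '+' ∨ s[i]? = some '*') then
      match s[i]? with
      | none => none
      | some op =>
        match parseTerm s adv f (i + 1) with
        | none => none
        | some (nxt, j) =>
          if adv = true ∧ op = '*' then chainLoop s adv f (done ++ last ++ ['*']) nxt j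
          else chainLoop s adv f done ('(' :: (last ++ [op] ++ nxt ++ [')'])) j
    else some (done ++ last, i)
end

-- the outer `while i < n` of B: one chain per iteration, output built once
def solveAltLoop (s : List Char) (adv : Bool) : Nat → List Char → Nat → Option (List Char)
  | 0, _, _ => none
  | f + 1, acc, i =>
    if i < s.length then
      match parseChain s adv (2 * s.length + 4) i with
      | none => none   -- IndexError in parse_term, outside Pre_solve
      | some (out, j) => solveAltLoop s adv f (acc ++ out) j
    else some acc

def solve_alt (expression : String) (advanced : Bool) : String :=
  match solveAltLoop expression.toList advanced (expression.toList.length + 1) [] 0 with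
  | some out => String.ofList out
  | none => ""   -- fuel/IndexError: only outside Pre_solve

-- ===== PRECONDITION & SPEC =====

-- One left-to-right scan with a parenthesis-depth counter `d` and a flag `afterTerm`
-- ("the previous character completed a term").  It accepts exactly the well-formed
-- expressions of the puzzle: sequences of operator chains whose terms are single
-- non-operator characters or parenthesised chains.
def chkRun : Bool → Nat → List Char → Bool
  | afterTerm, d, [] => afterTerm && d == 0
  | afterTerm, d, c :: r =>
    if c = '+' ∨ c = '*' then afterTerm && chkRun false d r
    else if c = '(' then (!afterTerm || d == 0) && chkRun false (d + 1) r
    else if c = ')' then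
      match d with
      | 0 => false
      | d' + 1 => afterTerm && chkRun true d' r
    else (!afterTerm || d == 0) && chkRun true d r

-- Pre_solve: well-formed expressions (balanced parentheses, every '+'/'*' between two
-- terms, parenthesised groups holding exactly one operator chain).  It excludes only
-- malformed strings — unbalanced parentheses, operators missing an operand, adjacent
-- terms inside one parenthesised group — on which A raises, diverges, or returns
-- accidental artefacts of its bracket-insertion scan (see cites).
def Pre_solve (expression : String) (advanced : Bool) : Prop :=
  expression.toList = [] ∨ chkRun false 0 expression.toList = true

instance (expression : String) (advanced : Bool) : Decidable (Pre_solve expression advanced) := by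
  unfold Pre_solve; infer_instance

def pvWitness_solve : String × Bool := ("(1+2)*3", false)

def Spec_solve (expression : String) (advanced : Bool) (out : String) : Prop := out = solve_alt expression advanced
instance (expression : String) (advanced : Bool) (out : String) : Decidable (Spec_solve expression advanced out) := by unfold Spec_solve; infer_instance

-- ===== CLAIM (what is proved, stated in full; the proofs are below) =====
def Claim_equal_solve : Prop := ∀ (expression : String) (advanced : Bool), Dom_solve expression advanced → Pre_solve expression advanced → Spec_solve expression advanced (solve expression advanced)

-- ===== LEMMAS AND PROOFS =====

def isAtomC (c : Char) : Bool := ¬ (c = '+' ∨ c = '*' ∨ c = '(' ∨ c = ')')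
def isOpC (c : Char) : Bool := c = '+' ∨ c = '*'

-- parse trees of the expression grammar
mutual
inductive PTerm : Type
  | atom : Char → PTerm
  | paren : PTerm → POps → PTerm
inductive POps : Type
  | nil : POps
  | cons : Char → PTerm → POps → POps
end

mutual
def flatT : PTerm → List Char
  | .atom c => [c]
  | .paren t o => '(' :: (flatT t ++ flatO o ++ [')'])
def flatO : POps → List Char
  | .nil => []
  | .cons c t r => c :: (flatT t ++ flatO r)
end

mutual
def validT : PTerm → Bool
  | .atom c => isAtomC c
  | .paren t o => validT t && validO o
def validO : POps → Bool
  | .nil => true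
  | .cons c t r => isOpC c && validT t && validO r
end

-- the transform both programs compute: fold a chain with a processed "last" term
mutual
def trT (adv : Bool) : PTerm → List Char
  | .atom c => [c]
  | .paren t o => '(' :: (trO adv (trT adv t) o ++ [')'])
def trO (adv : Bool) : List Char → POps → List Char
  | L, .nil => L
  | L, .cons c t r =>
    if adv = true ∧ c = '*' then L ++ '*' :: trO adv (trT adv t) r
    else trO adv ('(' :: (L ++ [c] ++ trT adv t ++ [')'])) r
end

def flatB : List (PTerm × POps) → List Char
  | [] => []
  | (t, o) :: r => flatT t ++ flatO o ++ flatB r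

def outB (adv : Bool) : List (PTerm × POps) → List Char
  | [] => []
  | (t, o) :: r => trO adv (trT adv t) o ++ outB adv r

def validB : List (PTerm × POps) → Bool
  | [] => true
  | (t, o) :: r => validT t && validO o && validB r

-- size measures for mutual induction
mutual
def szT : PTerm → Nat
  | .atom _ => 1
  | .paren t o => szT t + szO o + 1
def szO : POps → Nat
  | .nil => 0
  | .cons _ t r => szT t + szO r + 1
end

-- combined structural induction for the mutual grammar
theorem pt_po_ind (P : PTerm → Prop) (Q : POps → Prop)
    (ha : ∀ c, P (.atom c))
    (hp : ∀ t o, P t → Q o → P (.paren t o))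
    (hn : Q .nil)
    (hc : ∀ c t r, P t → Q r → Q (.cons c t r)) :
    (∀ t, P t) ∧ (∀ o, Q o) := by
  have key : ∀ n : Nat, (∀ t, szT t ≤ n → P t) ∧ (∀ o, szO o ≤ n → Q o) := by
    intro n
    induction n with
    | zero =>
      constructor
      · intro t ht; cases t <;> simp [szT] at ht
      · intro o ho
        cases o with
        | nil => exact hn
        | cons c t r => simp [szO] at ho
    | succ n ih =>
      constructor
      · intro t ht
        cases t with
        | atom c => exact ha c
        | paren t o =>
          simp only [szT] at ht
          exact hp t o (ih.1 t (by omega)) (ih.2 o (by omega))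
      · intro o ho
        cases o with
        | nil => exact hn
        | cons c t r =>
          simp only [szO] at ho
          exact hc c t r (ih.1 t (by omega)) (ih.2 r (by omega))
  exact ⟨fun t => (key (szT t)).1 t le_rfl, fun o => (key (szO o)).2 o le_rfl⟩

theorem flatT_len_pos : ∀ t : PTerm, 1 ≤ (flatT t).length := by
  intro t; cases t <;> simp [flatT]

theorem chkRun_cons (a : Bool) (d : Nat) (c : Char) (r : List Char) :
    chkRun a d (c :: r) =
      (if c = '+' ∨ c = '*' then a && chkRun false d r
       else if c = '(' then (!a || d == 0) && chkRun false (d + 1) r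
       else if c = ')' then
         (match d with
          | 0 => false
          | d' + 1 => a && chkRun true d' r)
       else (!a || d == 0) && chkRun true d r) := rfl

theorem decomp_main :
    ∀ (n : Nat) (l : List Char), l.length ≤ n →
      ((∀ d, chkRun false d l = true →
          ∃ t rest, l = flatT t ++ rest ∧ validT t = true ∧ chkRun true d rest = true)
      ∧ (∀ d, chkRun true (d + 1) l = true →
          ∃ o rest, l = flatO o ++ ')' :: rest ∧ validO o = true ∧ chkRun true d rest = true)
      ∧ (chkRun true 0 l = true →
          ∃ o bl, l = flatO o ++ flatB bl ∧ validO o = true ∧ validB bl = true)) := by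
  intro n
  induction n with
  | zero =>
    intro l hl
    have : l = [] := List.length_eq_zero_iff.mp (Nat.le_zero.mp hl)
    subst this
    refine ⟨?_, ?_, ?_⟩
    · intro d h; simp [chkRun] at h
    · intro d h; simp [chkRun] at h
    · intro _; exact ⟨.nil, [], by simp [flatO, flatB], rfl, rfl⟩
  | succ n ih =>
    intro l hl
    cases l with
    | nil =>
      refine ⟨?_, ?_, ?_⟩
      · intro d h; simp [chkRun] at h
      · intro d h; simp [chkRun] at h
      · intro _; exact ⟨.nil, [], by simp [flatO, flatB], rfl, rfl⟩
    | cons c r =>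
      have hr : r.length ≤ n := by simpa using hl
      by_cases hop : c = '+' ∨ c = '*'
      · -- operator character
        refine ⟨?_, ?_, ?_⟩
        · intro d h
          rw [chkRun_cons, if_pos hop] at h
          simp at h
        · intro d h
          rw [chkRun_cons, if_pos hop] at h
          obtain ⟨-, h⟩ := Bool.and_eq_true_iff.mp h
          obtain ⟨t, rest1, he1, hv1, hk1⟩ := (ih r hr).1 (d + 1) h
          have hrest1 : rest1.length ≤ n := by
            have := congrArg List.length he1
            simp at this
            omega
          obtain ⟨o, rest2, he2, hv2, hk2⟩ := (ih rest1 hrest1).2.1 d hk1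
          refine ⟨.cons c t o, rest2, ?_, ?_, hk2⟩
          · simp [flatO, he1, he2]
          · simp [validO, hv1, hv2, isOpC, hop]
        · intro h
          rw [chkRun_cons, if_pos hop] at h
          obtain ⟨-, h⟩ := Bool.and_eq_true_iff.mp h
          obtain ⟨t, rest1, he1, hv1, hk1⟩ := (ih r hr).1 0 h
          have hrest1 : rest1.length ≤ n := by
            have := congrArg List.length he1
            simp at this
            omega
          obtain ⟨o, bl, he2, hv2, hv3⟩ := (ih rest1 hrest1).2.2 hk1
          refine ⟨.cons c t o, bl, ?_, ?_, hv3⟩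
          · simp [flatO, he1, he2]
          · simp [validO, hv1, hv2, isOpC, hop]
      · by_cases hpar : c = '('
        · -- opening parenthesis: consume a parenthesised term
          have key : ∀ d, chkRun false (d + 1) r = true →
              ∃ t rest, c :: r = flatT t ++ rest ∧ validT t = true ∧
                chkRun true d rest = true := by
            intro d h
            obtain ⟨t1, rest1, he1, hv1, hk1⟩ := (ih r hr).1 (d + 1) h
            have hrest1 : rest1.length ≤ n := by
              have := congrArg List.length he1
              simp at this
              omega
            obtain ⟨o1, rest2, he2, hv2, hk2⟩ := (ih rest1 hrest1).2.1 d hk1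
            refine ⟨.paren t1 o1, rest2, ?_, ?_, hk2⟩
            · simp [flatT, hpar, he1, he2]
            · simp [validT, hv1, hv2]
          refine ⟨?_, ?_, ?_⟩
          · intro d h
            rw [chkRun_cons, if_neg hop, if_pos hpar] at h
            obtain ⟨-, h⟩ := Bool.and_eq_true_iff.mp h
            exact key d h
          · intro d h
            rw [chkRun_cons, if_neg hop, if_pos hpar] at h
            simp at h
          · intro h
            rw [chkRun_cons, if_neg hop, if_pos hpar] at h
            obtain ⟨-, h⟩ := Bool.and_eq_true_iff.mp h
            obtain ⟨t, rest1, he1, hv1, hk1⟩ := key 0 h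
            have hrest1 : rest1.length ≤ n := by
              have h1 := flatT_len_pos t
              have := congrArg List.length he1
              simp at this
              omega
            obtain ⟨o2, bl, he2, hv2, hv3⟩ := (ih rest1 hrest1).2.2 hk1
            -- the chain starting at this term: it has no leading ops: o from rest is o2?
            refine ⟨.nil, (t, o2) :: bl, ?_, rfl, ?_⟩
            · simp [flatO, flatB, he1, he2]
            · simp [validB, hv1, hv2, hv3]
        · by_cases hcl : c = ')'
          · -- closing parenthesis
            refine ⟨?_, ?_, ?_⟩
            · intro d h
              rw [chkRun_cons, if_neg hop, if_neg hpar, if_pos hcl] at h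
              cases d with
              | zero => simp at h
              | succ d' => simp at h
            · intro d h
              rw [chkRun_cons, if_neg hop, if_neg hpar, if_pos hcl] at h
              obtain ⟨-, h⟩ := Bool.and_eq_true_iff.mp h
              exact ⟨.nil, r, by simp [flatO, hcl], rfl, h⟩
            · intro h
              rw [chkRun_cons, if_neg hop, if_neg hpar, if_pos hcl] at h
              simp at h
          · -- atom character
            have hat : isAtomC c = true := by
              simp [isAtomC]
              tauto
            refine ⟨?_, ?_, ?_⟩
            · intro d h
              rw [chkRun_cons, if_neg hop, if_neg hpar, if_neg hcl] at h
              obtain ⟨-, h⟩ := Bool.and_eq_true_iff.mp h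
              exact ⟨.atom c, r, by simp [flatT], by simp [validT, hat], h⟩
            · intro d h
              rw [chkRun_cons, if_neg hop, if_neg hpar, if_neg hcl] at h
              simp at h
            · intro h
              rw [chkRun_cons, if_neg hop, if_neg hpar, if_neg hcl] at h
              obtain ⟨-, h⟩ := Bool.and_eq_true_iff.mp h
              obtain ⟨o2, bl, he2, hv2, hv3⟩ := (ih r hr).2.2 h
              exact ⟨.nil, (.atom c, o2) :: bl, by simp [flatO, flatB, flatT, he2],
                rfl, by simp [validB, validT, hat, hv2, hv3]⟩

theorem pre_decomp (l : List Char) (h : chkRun false 0 l = true) :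
    ∃ bl, l = flatB bl ∧ validB bl = true := by
  obtain ⟨t, rest1, he1, hv1, hk1⟩ := (decomp_main l.length l le_rfl).1 0 h
  have hrest1 : rest1.length ≤ l.length := by
    have := congrArg List.length he1
    simp at this
    omega
  obtain ⟨o, bl, he2, hv2, hv3⟩ := (decomp_main l.length rest1 hrest1).2.2 hk1
  exact ⟨(t, o) :: bl, by simp [flatB, he1, he2], by simp [validB, hv1, hv2, hv3]⟩

-- balanced strings: what A's bracket scans traverse without changing the counter
inductive Bal : List Char → Prop
  | nil : Bal []
  | atom (c : Char) (r : List Char) : c ≠ '(' → c ≠ ')' → Bal r → Bal (c :: r)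
  | paren (I r : List Char) : Bal I → Bal r → Bal ('(' :: I ++ ')' :: r)

theorem Bal_append : ∀ {x y : List Char}, Bal x → Bal y → Bal (x ++ y) := by
  intro x y hx hy
  induction hx with
  | nil => simpa using hy
  | atom c r h1 h2 _ ih => exact Bal.atom c _ h1 h2 ih
  | paren I r hI _ ihI ih =>
    have := Bal.paren I (r ++ y) hI ih
    simpa using this

theorem Bal_single (c : Char) (h1 : c ≠ '(') (h2 : c ≠ ')') : Bal [c] :=
  Bal.atom c [] h1 h2 Bal.nil

theorem Bal_wrap {I : List Char} (h : Bal I) : Bal ('(' :: I ++ [')']) := by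
  have := Bal.paren I [] h Bal.nil
  simpa using this

theorem atomC_ne (c : Char) (h : isAtomC c = true) : c ≠ '(' ∧ c ≠ ')' ∧ c ≠ '+' ∧ c ≠ '*' := by
  simp [isAtomC] at h
  tauto

theorem opC_ne (c : Char) (h : isOpC c = true) : c ≠ '(' ∧ c ≠ ')' := by
  simp [isOpC] at h
  rcases h with h | h <;> subst h <;> exact ⟨by decide, by decide⟩

theorem Bal_flat : (∀ t, validT t = true → Bal (flatT t)) ∧
    (∀ o, validO o = true → Bal (flatO o)) := by
  refine pt_po_ind (fun t => validT t = true → Bal (flatT t))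
    (fun o => validO o = true → Bal (flatO o)) ?_ ?_ ?_ ?_
  · intro c h
    rw [validT] at h
    exact Bal_single c (atomC_ne c h).1 (atomC_ne c h).2.1
  · intro t o iht iho h
    rw [validT, Bool.and_eq_true] at h
    have : Bal (flatT t ++ flatO o) := Bal_append (iht h.1) (iho h.2)
    rw [flatT]
    have h2 := Bal_wrap this
    simpa using h2
  · intro _
    exact Bal.nil
  · intro c t r iht ihr h
    rw [validO, Bool.and_eq_true, Bool.and_eq_true] at h
    exact Bal.atom c _ (opC_ne c h.1.1).1 (opC_ne c h.1.1).2
      (Bal_append (iht h.1.2) (ihr h.2))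

theorem Bal_tr (adv : Bool) : (∀ t, validT t = true → Bal (trT adv t)) ∧
    (∀ o, validO o = true → ∀ L, Bal L → Bal (trO adv L o)) := by
  refine pt_po_ind (fun t => validT t = true → Bal (trT adv t))
    (fun o => validO o = true → ∀ L, Bal L → Bal (trO adv L o)) ?_ ?_ ?_ ?_
  · intro c h
    rw [validT] at h
    exact Bal_single c (atomC_ne c h).1 (atomC_ne c h).2.1
  · intro t o iht iho h
    rw [validT, Bool.and_eq_true] at h
    rw [trT]
    have h2 := Bal_wrap (iho h.2 (trT adv t) (iht h.1))
    simpa using h2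
  · intro _ L hL
    rw [trO]
    exact hL
  · intro c t r iht ihr h L hL
    rw [validO, Bool.and_eq_true, Bool.and_eq_true] at h
    rw [trO]
    split_ifs with hadv
    · exact Bal_append hL (Bal.atom '*' _ (by decide) (by decide) (ihr h.2 _ (iht h.1.2)))
    · refine ihr h.2 _ ?_
      have hI : Bal (L ++ [c] ++ trT adv t) :=
        Bal_append (Bal_append hL (Bal_single c (opC_ne c h.1.1).1 (opC_ne c h.1.1).2))
          (iht h.1.2)
      have h2 := Bal_wrap hI
      simpa using h2

-- processed-term strings: a single atom, or a parenthesised balanced group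
inductive PT : List Char → Prop
  | atom (c : Char) : isAtomC c = true → PT [c]
  | paren (I : List Char) : Bal I → PT ('(' :: I ++ [')'])

theorem PT_Bal {L : List Char} (h : PT L) : Bal L := by
  cases h with
  | atom c hc => exact Bal_single c (atomC_ne c hc).1 (atomC_ne c hc).2.1
  | paren I hI => exact Bal_wrap hI

theorem PT_trT (adv : Bool) (t : PTerm) (h : validT t = true) : PT (trT adv t) := by
  cases t with
  | atom c =>
    rw [validT] at h
    exact PT.atom c h
  | paren t o =>
    rw [validT, Bool.and_eq_true] at h
    rw [trT]
    exact PT.paren _ ((Bal_tr adv).2 o h.2 _ ((Bal_tr adv).1 t h.1))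

theorem matchLoop_done (expr : List Char) (f : Nat) (pos : Int) :
    matchLoop expr ')' '(' (-1) f 0 pos = some pos := by
  rw [matchLoop.eq_def]; simp

theorem matchLoop_done_fwd (expr : List Char) (f : Nat) (pos : Int) :
    matchLoop expr '(' ')' 1 f 0 pos = some pos := by
  rw [matchLoop.eq_def]; simp

theorem matchLoop_left_step (expr E : List Char) (x : Char) (T : List Char)
    (hE : expr = E ++ x :: T) (f : Nat) (c : Int) (hc : 0 < c) :
    matchLoop expr ')' '(' (-1) (f + 1) c ((E.length : Int) + 1) =
      matchLoop expr ')' '(' (-1) f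
        (if x = ')' then c + 1 else if x = '(' then c - 1 else c) (E.length : Int) := by
  subst hE
  rw [matchLoop.eq_def]
  have h1 : ((E.length : Int) + 1 + -1) = (E.length : Int) := by ring
  simp only [if_pos hc, h1, PySem.List.pyGet?_append_length E T x]

theorem matchLoop_right_step (expr E : List Char) (x : Char) (T : List Char)
    (hE : expr = E ++ x :: T) (f : Nat) (c : Int) (hc : 0 < c) :
    matchLoop expr '(' ')' 1 (f + 1) c ((E.length : Int) - 1) =
      matchLoop expr '(' ')' 1 f
        (if x = '(' then c + 1 else if x = ')' then c - 1 else c) (E.length : Int) := by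
  subst hE
  rw [matchLoop.eq_def]
  have h1 : ((E.length : Int) - 1 + 1) = (E.length : Int) := by ring
  simp only [if_pos hc, h1, PySem.List.pyGet?_append_length E T x]

theorem matchLoop_bal : ∀ {M : List Char}, Bal M →
    ∀ (D S : List Char) (f : Nat) (c : Int), 1 ≤ c → M.length ≤ f →
      matchLoop (D ++ M ++ S) ')' '(' (-1) f c ((D.length : Int) + M.length) =
        matchLoop (D ++ M ++ S) ')' '(' (-1) (f - M.length) c (D.length : Int) := by
  intro M hM
  induction hM with
  | nil => intro D S f c hc hf; simp
  | atom c0 r h1 h2 hr ih =>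
    intro D S f c hc hf
    simp only [List.length_cons] at hf
    have e1 : D ++ c0 :: r ++ S = (D ++ [c0]) ++ r ++ S := by simp
    have e2 : (D.length : Int) + ((c0 :: r).length : Int)
        = ((D ++ [c0]).length : Int) + (r.length : Int) := by push_cast; simp; ring
    rw [e2, e1, ih (D ++ [c0]) S f c hc (by omega), ← e1]
    obtain ⟨g, hg⟩ : ∃ g, f - r.length = g + 1 := ⟨f - r.length - 1, by omega⟩
    have e3 : ((D ++ [c0]).length : Int) = (D.length : Int) + 1 := by simp
    rw [hg, e3, matchLoop_left_step (D ++ c0 :: r ++ S) D c0 (r ++ S) (by simp) g c (by omega)]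
    rw [if_neg h2, if_neg h1]
    congr 1 <;> push_cast <;> simp <;> omega
  | paren I r hI hr ihI ihr =>
    intro D S f c hc hf
    have hlen : (('(' :: I ++ ')' :: r).length) = I.length + r.length + 2 := by simp; ring
    rw [hlen] at hf
    -- scan back across r
    have e1 : D ++ ('(' :: I ++ ')' :: r) ++ S = (D ++ '(' :: I ++ [')']) ++ r ++ S := by simp
    have e2 : (D.length : Int) + ((('(' :: I ++ ')' :: r)).length : Int)
        = ((D ++ '(' :: I ++ [')']).length : Int) + (r.length : Int) := by
      push_cast; simp; ring
    rw [e2, e1, ihr (D ++ '(' :: I ++ [')']) S f c hc (by omega), ← e1]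
    -- read the ')'
    obtain ⟨g, hg⟩ : ∃ g, f - r.length = g + 1 := ⟨f - r.length - 1, by omega⟩
    have e3 : ((D ++ '(' :: I ++ [')']).length : Int) = ((D ++ '(' :: I).length : Int) + 1 := by
      simp
      omega
    rw [hg, e3, matchLoop_left_step (D ++ ('(' :: I ++ ')' :: r) ++ S) (D ++ '(' :: I) ')'
      (r ++ S) (by simp) g c (by omega), if_pos rfl]
    -- scan back across I
    have e4 : D ++ ('(' :: I ++ ')' :: r) ++ S = (D ++ ['(']) ++ I ++ (')' :: r ++ S) := by simp
    have e5 : ((D ++ '(' :: I).length : Int) = ((D ++ ['(']).length : Int) + (I.length : Int) := by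
      push_cast; simp; ring
    rw [e5, e4, ihI (D ++ ['(']) (')' :: r ++ S) g (c + 1) (by omega) (by omega), ← e4]
    -- read the '('
    obtain ⟨g2, hg2⟩ : ∃ g2, g - I.length = g2 + 1 := ⟨g - I.length - 1, by omega⟩
    have e6 : ((D ++ ['(']).length : Int) = (D.length : Int) + 1 := by simp
    rw [hg2, e6, matchLoop_left_step (D ++ ('(' :: I ++ ')' :: r) ++ S) D '('
      (I ++ ')' :: r ++ S) (by simp) g2 (c + 1) (by omega), if_neg (by decide), if_pos rfl]
    have e7 : c + 1 - 1 = c := by ring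
    rw [e7]
    congr 1 <;> push_cast <;> simp <;> omega

theorem matchLoop_bal_fwd : ∀ {M : List Char}, Bal M →
    ∀ (pre S : List Char) (f : Nat) (c : Int), 1 ≤ c → M.length ≤ f →
      matchLoop (pre ++ M ++ S) '(' ')' 1 f c ((pre.length : Int) - 1) =
        matchLoop (pre ++ M ++ S) '(' ')' 1 (f - M.length) c
          ((pre.length : Int) + (M.length : Int) - 1) := by
  intro M hM
  induction hM with
  | nil => intro pre S f c hc hf; simp
  | atom c0 r h1 h2 hr ih =>
    intro pre S f c hc hf
    simp only [List.length_cons] at hf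
    obtain ⟨g, hg⟩ : ∃ g, f = g + 1 := ⟨f - 1, by omega⟩
    rw [hg, matchLoop_right_step (pre ++ c0 :: r ++ S) pre c0 (r ++ S) (by simp) g c hc,
      if_neg h1, if_neg h2]
    have e1 : pre ++ c0 :: r ++ S = (pre ++ [c0]) ++ r ++ S := by simp
    have e2 : (pre.length : Int) = ((pre ++ [c0]).length : Int) - 1 := by simp
    rw [e2, e1, ih (pre ++ [c0]) S g c hc (by omega), ← e1]
    have e3 : ((pre ++ [c0]).length : Int) + (r.length : Int) - 1
        = (pre.length : Int) + (((c0 :: r).length : Nat) : Int) - 1 := by push_cast; simp; ring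
    rw [e3]
    congr 1 <;> push_cast <;> simp <;> omega
  | paren I r hI hr ihI ihr =>
    intro pre S f c hc hf
    have hlen : (('(' :: I ++ ')' :: r).length) = I.length + r.length + 2 := by simp; ring
    rw [hlen] at hf
    -- read the '('
    obtain ⟨g, hg⟩ : ∃ g, f = g + 1 := ⟨f - 1, by omega⟩
    rw [hg, matchLoop_right_step (pre ++ ('(' :: I ++ ')' :: r) ++ S) pre '('
      (I ++ ')' :: r ++ S) (by simp) g c hc, if_pos rfl]
    -- scan forward across I
    have e1 : pre ++ ('(' :: I ++ ')' :: r) ++ S = (pre ++ ['(']) ++ I ++ (')' :: r ++ S) := by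
      simp
    have e2 : (pre.length : Int) = ((pre ++ ['(']).length : Int) - 1 := by simp
    rw [e2, e1, ihI (pre ++ ['(']) (')' :: r ++ S) g (c + 1) (by omega) (by omega), ← e1]
    -- read the ')'
    obtain ⟨g2, hg2⟩ : ∃ g2, g - I.length = g2 + 1 := ⟨g - I.length - 1, by omega⟩
    have e3 : ((pre ++ ['(']).length : Int) + (I.length : Int) - 1
        = ((pre ++ '(' :: I).length : Int) - 1 := by push_cast; simp; ring
    rw [hg2, e3, matchLoop_right_step (pre ++ ('(' :: I ++ ')' :: r) ++ S) (pre ++ '(' :: I) ')'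
      (r ++ S) (by simp) g2 (c + 1) (by omega), if_neg (by decide), if_pos rfl]
    -- scan forward across r
    have e4 : pre ++ ('(' :: I ++ ')' :: r) ++ S = (pre ++ '(' :: I ++ [')']) ++ r ++ S := by
      simp
    have e5 : ((pre ++ '(' :: I).length : Int) = ((pre ++ '(' :: I ++ [')']).length : Int) - 1 := by
      simp
      omega
    have e7 : c + 1 - 1 = c := by ring
    rw [e7, e5, e4, ihr (pre ++ '(' :: I ++ [')']) S g2 c hc (by omega), ← e4]
    have e6 : ((pre ++ '(' :: I ++ [')']).length : Int) + (r.length : Int) - 1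
        = (pre.length : Int) + ((('(' :: I ++ ')' :: r).length : Nat) : Int) - 1 := by
      push_cast; simp; ring
    rw [e6]
    congr 1 <;> push_cast <;> simp <;> omega

theorem pyGet_at (pre : List Char) (x : Char) (suf : List Char) (pos : Int) (e : List Char)
    (hpos : pos = (pre.length : Int)) (he : e = pre ++ x :: suf) :
    PySem.List.pyGet? e pos = some x := by
  subst hpos he
  exact PySem.List.pyGet?_append_length ..

theorem getElem_mid (pre : List Char) (x : Char) (suf : List Char) (i : Nat)
    (hi : i = pre.length) : (pre ++ x :: suf)[i]? = some x := by
  subst hi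
  simp

theorem getMatching_close (expr : List Char) (pos : Int)
    (h : PySem.List.pyGet? expr pos = some ')') :
    getMatchingBracketPos expr pos = matchLoop expr ')' '(' (-1) (2 * expr.length + 4) 1 pos := by
  rw [getMatchingBracketPos, h]
  norm_num [show ¬ ((')' : Char) = '(') from by decide]

theorem getMatching_open (expr : List Char) (pos : Int)
    (h : PySem.List.pyGet? expr pos = some '(') :
    getMatchingBracketPos expr pos = matchLoop expr '(' ')' 1 (2 * expr.length + 4) 1 pos := by
  rw [getMatchingBracketPos, h]
  norm_num

theorem getMatching_atom (expr : List Char) (pos : Int) (c : Char)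
    (h : PySem.List.pyGet? expr pos = some c) (h1 : ¬ (c = ')' ∨ c = '(')) :
    getMatchingBracketPos expr pos = some pos := by
  rw [getMatchingBracketPos, h]
  simp [h1]

theorem getMatching_back_PT (D L S : List Char) (hL : PT L) :
    getMatchingBracketPos (D ++ L ++ S) ((D.length : Int) + L.length - 1) =
      some (D.length : Int) := by
  cases hL with
  | atom c0 h =>
    obtain ⟨hx1, hx2, -, -⟩ := atomC_ne c0 h
    have hp : (D.length : Int) + (([c0] : List Char).length : Int) - 1 = (D.length : Int) := by
      simp
    have hE : D ++ [c0] ++ S = D ++ c0 :: S := by simp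
    rw [hp, getMatching_atom _ _ c0 (by rw [hE]; exact PySem.List.pyGet?_append_length D S c0)
      (by simp [hx1, hx2])]
  | paren I hI =>
    have hp : (D.length : Int) + ((('(' :: I ++ [')']) : List Char).length : Int) - 1
        = ((D ++ '(' :: I).length : Int) := by push_cast; simp; ring
    have hE : D ++ ('(' :: I ++ [')']) ++ S = (D ++ '(' :: I) ++ ')' :: S := by simp
    have hget : PySem.List.pyGet? (D ++ ('(' :: I ++ [')']) ++ S)
        ((D ++ '(' :: I).length : Int) = some ')' := by
      rw [hE]; exact PySem.List.pyGet?_append_length ..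
    rw [hp, getMatching_close _ _ hget]
    set F := 2 * (D ++ ('(' :: I ++ [')']) ++ S).length + 4 with hF
    have hFge : I.length + 2 ≤ F := by
      simp only [hF, List.length_append, List.length_cons]
      omega
    have e1 : D ++ ('(' :: I ++ [')']) ++ S = (D ++ ['(']) ++ I ++ (')' :: S) := by simp
    have e2 : ((D ++ '(' :: I).length : Int)
        = ((D ++ ['(']).length : Int) + (I.length : Int) := by push_cast; simp; ring
    rw [e2, e1, matchLoop_bal hI (D ++ ['(']) (')' :: S) F 1 le_rfl (by omega), ← e1]
    obtain ⟨g, hg⟩ : ∃ g, F - I.length = g + 1 := ⟨F - I.length - 1, by omega⟩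
    have e3 : ((D ++ ['(']).length : Int) = (D.length : Int) + 1 := by simp
    rw [hg, e3, matchLoop_left_step (D ++ ('(' :: I ++ [')']) ++ S) D '(' (I ++ ')' :: S)
      (by simp) g 1 one_pos, if_neg (by decide), if_pos rfl]
    norm_num [matchLoop_done]

theorem getMatching_fwd_paren (P I S : List Char) (hI : Bal I) :
    getMatchingBracketPos (P ++ ('(' :: I ++ [')']) ++ S) (P.length : Int) =
      some ((P.length : Int) + (I.length : Int) + 1) := by
  have hget : PySem.List.pyGet? (P ++ ('(' :: I ++ [')']) ++ S) (P.length : Int) = some '(' := by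
    exact pyGet_at P '(' (I ++ ')' :: S) _ _ rfl (by simp)
  rw [getMatching_open _ _ hget]
  set F := 2 * (P ++ ('(' :: I ++ [')']) ++ S).length + 4 with hF
  have hFge : I.length + 2 ≤ F := by
    simp only [hF, List.length_append, List.length_cons]
    omega
  have e1 : P ++ ('(' :: I ++ [')']) ++ S = (P ++ ['(']) ++ I ++ (')' :: S) := by simp
  have e2 : (P.length : Int) = (((P ++ ['(']).length : Nat) : Int) - 1 := by simp
  rw [e2, e1, matchLoop_bal_fwd hI (P ++ ['(']) (')' :: S) F 1 le_rfl (by omega), ← e1]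
  obtain ⟨g, hg⟩ : ∃ g, F - I.length = g + 1 := ⟨F - I.length - 1, by omega⟩
  have e3 : (((P ++ ['(']).length : Nat) : Int) + (I.length : Int) - 1
      = (((P ++ '(' :: I).length : Nat) : Int) - 1 := by simp; omega
  rw [hg, e3, matchLoop_right_step (P ++ ('(' :: I ++ [')']) ++ S) (P ++ '(' :: I) ')' S
    (by simp) g 1 one_pos, if_neg (by decide), if_pos rfl]
  norm_num [matchLoop_done_fwd]
  omega

theorem addBracket_left_PT (D L S : List Char) (hL : PT L) :
    addBracket (D ++ L ++ S) ((D.length : Int) + L.length - 1) "left" =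
      some (D ++ '(' :: (L ++ S)) := by
  rw [addBracket, getMatching_back_PT D L S hL]
  have h1 : ¬ (("left" : String) = "right") := by decide
  simp only [if_neg h1, reduceIte]
  rw [PySem.List.insert_natCast (D ++ L ++ S) D.length '(' (by simp)]
  have ht : (D ++ L ++ S).take D.length = D := by
    have : D ++ L ++ S = D ++ (L ++ S) := by simp
    rw [this, List.take_left]
  have hd : (D ++ L ++ S).drop D.length = L ++ S := by
    have : D ++ L ++ S = D ++ (L ++ S) := by simp
    rw [this, List.drop_left]
  rw [ht, hd]

theorem addBracket_right_atom (P : List Char) (a : Char) (ha : isAtomC a = true)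
    (S : List Char) :
    addBracket (P ++ a :: S) (P.length : Int) "right" = some (P ++ a :: ')' :: S) := by
  obtain ⟨hx2, hx1, -, -⟩ := atomC_ne a ha
  rw [addBracket, getMatching_atom _ _ a (PySem.List.pyGet?_append_length P S a)
    (by simp [hx1, hx2])]
  have h2 : ¬ (("right" : String) = "left") := by decide
  simp only [if_neg h2, if_true]
  have hp : (P.length : Int) + 1 = ((P.length + 1 : Nat) : Int) := by push_cast; ring
  rw [hp, PySem.List.insert_natCast (P ++ a :: S) (P.length + 1) ')' (by simp)]
  have hP : P ++ a :: S = (P ++ [a]) ++ S := by simp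
  have ht : (P ++ a :: S).take (P.length + 1) = P ++ [a] := by
    rw [hP]
    have : P.length + 1 = (P ++ [a]).length := by simp
    rw [this, List.take_left]
  have hd : (P ++ a :: S).drop (P.length + 1) = S := by
    rw [hP]
    have : P.length + 1 = (P ++ [a]).length := by simp
    rw [this, List.drop_left]
  rw [ht, hd]
  simp

theorem addBracket_right_term (P : List Char) (t : PTerm) (hv : validT t = true)
    (S : List Char) :
    addBracket (P ++ flatT t ++ S) (P.length : Int) "right" =
      some (P ++ flatT t ++ ')' :: S) := by
  cases t with
  | atom a =>
    rw [validT] at hv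
    have h := addBracket_right_atom P a hv S
    have e : P ++ flatT (.atom a) ++ S = P ++ a :: S := by simp [flatT]
    rw [e, h]
    simp [flatT]
  | paren t0 o =>
    rw [validT, Bool.and_eq_true] at hv
    have hI : Bal (flatT t0 ++ flatO o) := Bal_append (Bal_flat.1 t0 hv.1) (Bal_flat.2 o hv.2)
    have e : flatT (.paren t0 o) = '(' :: (flatT t0 ++ flatO o) ++ [')'] := by
      simp [flatT]
    rw [e, addBracket, getMatching_fwd_paren P (flatT t0 ++ flatO o) S hI]
    have h2 : ¬ (("right" : String) = "left") := by decide
    simp only [if_neg h2, if_true]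
    have hp : (P.length : Int) + ((flatT t0 ++ flatO o).length : Int) + 1 + 1
        = ((P.length + (flatT t0 ++ flatO o).length + 2 : Nat) : Int) := by push_cast; ring
    rw [hp, PySem.List.insert_natCast _ (P.length + (flatT t0 ++ flatO o).length + 2) ')'
      (by simp; omega)]
    have hlen : P.length + (flatT t0 ++ flatO o).length + 2
        = (P ++ '(' :: (flatT t0 ++ flatO o) ++ [')']).length := by simp; ring
    have ht : (P ++ ('(' :: (flatT t0 ++ flatO o) ++ [')']) ++ S).take
        (P.length + (flatT t0 ++ flatO o).length + 2)
        = P ++ '(' :: (flatT t0 ++ flatO o) ++ [')'] := by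
      rw [show P ++ ('(' :: (flatT t0 ++ flatO o) ++ [')']) ++ S
          = (P ++ '(' :: (flatT t0 ++ flatO o) ++ [')']) ++ S from by simp, hlen,
        List.take_left]
    have hd : (P ++ ('(' :: (flatT t0 ++ flatO o) ++ [')']) ++ S).drop
        (P.length + (flatT t0 ++ flatO o).length + 2) = S := by
      rw [show P ++ ('(' :: (flatT t0 ++ flatO o) ++ [')']) ++ S
          = (P ++ '(' :: (flatT t0 ++ flatO o) ++ [')']) ++ S from by simp, hlen,
        List.drop_left]
    rw [ht, hd]
    simp

theorem solveLoop_exit (adv : Bool) (f : Nat) (expr : List Char) (pos len : Int)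
    (h : ¬ pos < len) : solveLoop adv f expr pos len = some expr := by
  cases f <;> simp [solveLoop, h]

theorem solveLoop_noop (adv : Bool) (f : Nat) (expr : List Char) (pos len : Int) (ch : Char)
    (h1 : pos < len) (h2 : PySem.List.pyGet? expr pos = some ch)
    (h3 : ¬ (adv = true ∧ ch = '*')) (h4 : ¬ (ch = '+' ∨ ch = '*')) :
    solveLoop adv (f + 1) expr pos len = solveLoop adv f expr (pos + 1) (expr.length : Int) := by
  rw [solveLoop, if_pos h1, h2]
  simp only [if_neg h3, if_neg h4]

theorem solveLoop_skip (adv : Bool) (f : Nat) (expr : List Char) (pos len : Int) (ch : Char)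
    (h1 : pos < len) (h2 : PySem.List.pyGet? expr pos = some ch)
    (h3 : adv = true ∧ ch = '*') :
    solveLoop adv (f + 1) expr pos len = solveLoop adv f expr (pos + 1) (expr.length : Int) := by
  rw [solveLoop, if_pos h1, h2]
  simp only [if_pos h3]

theorem solveLoop_op (adv : Bool) (f : Nat) (expr l1 r1 : List Char) (pos len : Int) (ch : Char)
    (h1 : pos < len) (h2 : PySem.List.pyGet? expr pos = some ch)
    (h3 : ¬ (adv = true ∧ ch = '*')) (h4 : ch = '+' ∨ ch = '*')
    (h5 : addBracket expr (pos - 1) "left" = some l1)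
    (h6 : addBracket expr (pos + 1) "right" = some r1) :
    solveLoop adv (f + 1) expr pos len =
      solveLoop adv f
        (PySem.List.slice l1 none (some (pos + 1)) ++ [ch] ++
          PySem.List.slice r1 (some (pos + 1)) none) (pos + 2) (expr.length : Int) := by
  rw [solveLoop, if_pos h1, h2]
  simp only [if_neg h3, if_pos h4, h5, h6]

theorem solveLoop_mono (adv : Bool) : ∀ (f f' : Nat) (e : List Char) (p l : Int)
    (r : List Char), solveLoop adv f e p l = some r → f ≤ f' →
    solveLoop adv f' e p l = some r := by
  intro f
  induction f with
  | zero =>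
    intro f' e p l r h _
    by_cases hp : p < l
    · rw [solveLoop, if_pos hp] at h; cases h
    · rw [solveLoop_exit _ _ _ _ _ hp] at h ⊢; exact h
  | succ f ih =>
    intro f' e p l r h hle
    by_cases hp : p < l
    · obtain ⟨f2, rfl⟩ : ∃ f2, f' = f2 + 1 := ⟨f' - 1, by omega⟩
      rcases hg : PySem.List.pyGet? e p with - | ch
      · rw [solveLoop, if_pos hp, hg] at h; cases h
      · by_cases h3 : adv = true ∧ ch = '*'
        · rw [solveLoop_skip adv f e p l ch hp hg h3] at h
          rw [solveLoop_skip adv f2 e p l ch hp hg h3]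
          exact ih f2 e (p + 1) _ r h (by omega)
        · by_cases h4 : ch = '+' ∨ ch = '*'
          · rcases hb1 : addBracket e (p - 1) "left" with - | l1
            · rw [solveLoop, if_pos hp, hg] at h
              simp only [if_neg h3, if_pos h4, hb1] at h
              cases h
            · rcases hb2 : addBracket e (p + 1) "right" with - | r1
              · rw [solveLoop, if_pos hp, hg] at h
                simp only [if_neg h3, if_pos h4, hb1, hb2] at h
                cases h
              · rw [solveLoop_op adv f e l1 r1 p l ch hp hg h3 h4 hb1 hb2] at h
                rw [solveLoop_op adv f2 e l1 r1 p l ch hp hg h3 h4 hb1 hb2]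
                exact ih f2 _ (p + 2) _ r h (by omega)
          · rw [solveLoop_noop adv f e p l ch hp hg h3 h4] at h
            rw [solveLoop_noop adv f2 e p l ch hp hg h3 h4]
            exact ih f2 e (p + 1) _ r h (by omega)
    · rw [solveLoop_exit _ _ _ _ _ hp] at h ⊢; exact h

theorem flatO_eq_nil : ∀ {o : POps}, flatO o = [] → o = POps.nil := by
  intro o h
  cases o with
  | nil => rfl
  | cons c t r => simp [flatO] at h

-- the two statements of the A-side simulation
def TS (adv : Bool) (t : PTerm) : Prop :=
  validT t = true → ∀ (D S : List Char) (f : Nat) (len : Int) (r : List Char),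
    (D.length : Int) < len → 3 * (flatT t).length ≤ f →
    solveLoop adv (f - 3 * (flatT t).length) (D ++ trT adv t ++ S)
        ((D.length : Int) + ((trT adv t).length : Int))
        ((D.length : Int) + ((trT adv t).length : Int) + (S.length : Int)) = some r →
    solveLoop adv f (D ++ flatT t ++ S) (D.length : Int) len = some r

def OS (adv : Bool) (o : POps) : Prop :=
  validO o = true → ∀ (D L S : List Char) (f : Nat) (r : List Char), PT L →
    3 * (flatO o).length ≤ f →
    solveLoop adv (f - 3 * (flatO o).length) (D ++ trO adv L o ++ S)
        ((D.length : Int) + ((trO adv L o).length : Int))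
        ((D.length : Int) + ((trO adv L o).length : Int) + (S.length : Int)) = some r →
    solveLoop adv f (D ++ L ++ (flatO o ++ S)) ((D.length : Int) + (L.length : Int))
        ((D.length : Int) + (L.length : Int) + (((flatO o).length : Int) + (S.length : Int)))
      = some r

theorem A_sim (adv : Bool) : (∀ t, TS adv t) ∧ (∀ o, OS adv o) := by
  refine pt_po_ind (TS adv) (OS adv) ?_ ?_ ?_ ?_
  · -- atom
    intro c hv D S f len r hlen hf hres
    rw [validT] at hv
    simp only [flatT, List.length_cons, List.length_nil] at hf ⊢
    simp only [trT, flatT, List.length_cons, List.length_nil] at hres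
    obtain ⟨ha1, ha2, ha3, ha4⟩ := atomC_ne c hv
    obtain ⟨f1, rfl⟩ : ∃ f1, f = f1 + 1 := ⟨f - 1, by omega⟩
    rw [solveLoop_noop adv f1 (D ++ [c] ++ S) (D.length : Int) len c hlen
      (pyGet_at D c S _ _ rfl (by simp)) (by rintro ⟨-, h⟩; exact ha4 h)
      (by rintro (h | h); exacts [ha3 h, ha4 h])]
    rw [show (((D ++ [c] ++ S).length : Nat) : Int)
        = (D.length : Int) + ((0 + 1 : Nat) : Int) + (S.length : Int) from by
      push_cast; simp; try ring]
    rw [show (D.length : Int) + 1 = (D.length : Int) + ((0 + 1 : Nat) : Int) from by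
      push_cast; try ring]
    exact solveLoop_mono adv _ _ _ _ _ r hres (by omega)
  · -- paren
    intro t0 o iht iho hv D S f len r hlen hf hres
    rw [validT, Bool.and_eq_true] at hv
    have hlT : (flatT (PTerm.paren t0 o)).length
        = (flatT t0).length + (flatO o).length + 2 := by simp [flatT]; try omega
    have hlt0 := flatT_len_pos t0
    rw [hlT] at hf
    obtain ⟨f1, rfl⟩ : ∃ f1, f = f1 + 1 := ⟨f - 1, by omega⟩
    -- step over the raw '('
    rw [show D ++ flatT (PTerm.paren t0 o) ++ S
        = D ++ '(' :: (flatT t0 ++ flatO o ++ [')'] ++ S) from by simp [flatT]]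
    rw [solveLoop_noop adv f1 _ (D.length : Int) len '(' hlen
      (pyGet_at D '(' (flatT t0 ++ flatO o ++ [')'] ++ S) _ _ rfl rfl)
      (by rintro ⟨-, h⟩; exact absurd h (by decide))
      (by rintro (h | h) <;> exact absurd h (by decide))]
    -- process the inner head term t0
    rw [show D ++ '(' :: (flatT t0 ++ flatO o ++ [')'] ++ S)
        = (D ++ ['(']) ++ flatT t0 ++ (flatO o ++ (')' :: S)) from by simp]
    rw [show (D.length : Int) + 1 = (((D ++ ['(']).length : Nat) : Int) from by simp]
    refine iht hv.1 (D ++ ['(']) (flatO o ++ (')' :: S)) f1 _ r ?_ ?_ ?_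
    · push_cast; simp; omega
    · omega
    -- process the inner operator chain o
    rw [show ((((flatO o ++ (')' :: S))).length : Nat) : Int)
        = (((flatO o).length : Nat) : Int) + ((((')' :: S : List Char)).length : Nat) : Int)
        from by push_cast; simp; try ring]
    refine iho hv.2 (D ++ ['(']) (trT adv t0) (')' :: S) (f1 - 3 * (flatT t0).length) r
      (PT_trT adv t0 hv.1) ?_ ?_
    · omega
    -- step over the raw ')'
    obtain ⟨f3, hf3⟩ : ∃ f3, f1 - 3 * (flatT t0).length - 3 * (flatO o).length = f3 + 1 :=
      ⟨f1 - 3 * (flatT t0).length - 3 * (flatO o).length - 1, by omega⟩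
    rw [hf3]
    rw [solveLoop_noop adv f3 _ _ _ ')'
      (by push_cast; simp; try omega)
      (pyGet_at ((D ++ ['(']) ++ trO adv (trT adv t0) o) ')' S _ _ (by push_cast; simp; try ring)
        (by simp))
      (by rintro ⟨-, h⟩; exact absurd h (by decide))
      (by rintro (h | h) <;> exact absurd h (by decide))]
    -- this is the processed state of the whole parenthesised term
    rw [show (D ++ ['(']) ++ trO adv (trT adv t0) o ++ (')' :: S)
        = D ++ trT adv (PTerm.paren t0 o) ++ S from by simp [trT]]
    rw [show (((D ++ ['(']).length : Nat) : Int) + (((trO adv (trT adv t0) o).length : Nat) : Int) + 1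
        = (D.length : Int) + (((trT adv (PTerm.paren t0 o)).length : Nat) : Int) from by
      simp [trT]; push_cast; try ring]
    rw [show (((D ++ trT adv (PTerm.paren t0 o) ++ S).length : Nat) : Int)
        = (D.length : Int) + (((trT adv (PTerm.paren t0 o)).length : Nat) : Int) + (S.length : Int)
        from by push_cast; simp; try ring]
    exact solveLoop_mono adv _ _ _ _ _ r hres (by omega)
  · -- ops nil
    intro hv D L S f r hL hf hres
    simpa [trO, flatO] using hres
  · -- ops cons
    intro c t rest iht ihr hv D L S f r hL hf hres
    rw [validO, Bool.and_eq_true, Bool.and_eq_true] at hv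
    obtain ⟨⟨hoc, hvt⟩, hvr⟩ := hv
    have hlf : (flatO (POps.cons c t rest)).length
        = (flatT t).length + (flatO rest).length + 1 := by simp [flatO]; try omega
    have hlt0 := flatT_len_pos t
    rw [hlf] at hf
    obtain ⟨f1, rfl⟩ : ∃ f1, f = f1 + 1 := ⟨f - 1, by omega⟩
    have hget_o : PySem.List.pyGet? (D ++ L ++ (flatO (POps.cons c t rest) ++ S))
        ((D.length : Int) + (L.length : Int)) = some c :=
      pyGet_at (D ++ L) c (flatT t ++ flatO rest ++ S) _ _ (by simp)
        (by simp [flatO])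
    have hlt1 : (D.length : Int) + (L.length : Int) < (D.length : Int) + (L.length : Int)
        + (((flatO (POps.cons c t rest)).length : Int) + (S.length : Int)) := by
      rw [hlf]; push_cast; omega
    by_cases hadv : adv = true ∧ c = '*'
    · -- advanced '*': skip, then process the raw right term
      have hG : trO adv L (POps.cons c t rest) = L ++ '*' :: trO adv (trT adv t) rest := by
        rw [trO, if_pos hadv]
      rw [solveLoop_skip adv f1 _ _ _ c hlt1 hget_o (hadv.2 ▸ hadv)]
      rw [show D ++ L ++ (flatO (POps.cons c t rest) ++ S)
          = (D ++ L ++ ['*']) ++ flatT t ++ (flatO rest ++ S) from by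
        rw [hadv.2]; simp [flatO]]
      rw [show (D.length : Int) + (L.length : Int) + 1
          = (((D ++ L ++ ['*']).length : Nat) : Int) from by push_cast; simp; try ring]
      refine iht hvt (D ++ L ++ ['*']) (flatO rest ++ S) f1 _ r ?_ ?_ ?_
      · push_cast; simp; omega
      · omega
      rw [show ((((flatO rest ++ S)).length : Nat) : Int)
          = (((flatO rest).length : Nat) : Int) + ((S.length : Nat) : Int) from by
        push_cast; simp]
      refine ihr hvr (D ++ L ++ ['*']) (trT adv t) S (f1 - 3 * (flatT t).length) r
        (PT_trT adv t hvt) ?_ ?_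
      · omega
      rw [show (D ++ L ++ ['*']) ++ trO adv (trT adv t) rest ++ S
          = D ++ trO adv L (POps.cons c t rest) ++ S from by rw [hG]; simp]
      rw [show (((D ++ L ++ ['*']).length : Nat) : Int) + (((trO adv (trT adv t) rest).length : Nat) : Int)
          = (D.length : Int) + (((trO adv L (POps.cons c t rest)).length : Nat) : Int) from by
        rw [hG]; push_cast; simp; try ring]
      exact solveLoop_mono adv _ _ _ _ _ r hres (by omega)
    · -- '+' (or non-advanced '*'): insert both brackets
      have h4 : c = '+' ∨ c = '*' := by simpa [isOpC] using hoc
      have hG : trO adv L (POps.cons c t rest)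
          = trO adv ('(' :: (L ++ [c] ++ trT adv t ++ [')'])) rest := by
        rw [trO, if_neg hadv]
      have hleft : addBracket (D ++ L ++ (flatO (POps.cons c t rest) ++ S))
          ((D.length : Int) + (L.length : Int) - 1) "left"
          = some (D ++ '(' :: (L ++ (flatO (POps.cons c t rest) ++ S))) :=
        addBracket_left_PT D L (flatO (POps.cons c t rest) ++ S) hL
      have hright : addBracket (D ++ L ++ (flatO (POps.cons c t rest) ++ S))
          ((D.length : Int) + (L.length : Int) + 1) "right"
          = some ((D ++ L ++ [c]) ++ flatT t ++ ')' :: (flatO rest ++ S)) := by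
        have h := addBracket_right_term (D ++ L ++ [c]) t hvt (flatO rest ++ S)
        rw [show D ++ L ++ (flatO (POps.cons c t rest) ++ S)
            = (D ++ L ++ [c]) ++ flatT t ++ (flatO rest ++ S) from by simp [flatO]]
        rw [show ((D.length : Int) + (L.length : Int) + 1)
            = (((D ++ L ++ [c]).length : Nat) : Int) from by push_cast; simp; try ring]
        rw [h]
      rw [solveLoop_op adv f1 _ _ _ _ _ c hlt1 hget_o hadv h4 hleft hright]
      have hslice1 : PySem.List.slice (D ++ '(' :: (L ++ (flatO (POps.cons c t rest) ++ S))) none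
          (some ((D.length : Int) + (L.length : Int) + 1)) = D ++ '(' :: L := by
        rw [show ((D.length : Int) + (L.length : Int) + 1)
            = (((D ++ '(' :: L).length : Nat) : Int) from by push_cast; simp; try ring]
        rw [PySem.List.slice_to_natCast]
        rw [show D ++ '(' :: (L ++ (flatO (POps.cons c t rest) ++ S))
            = (D ++ '(' :: L) ++ (flatO (POps.cons c t rest) ++ S) from by simp]
        exact List.take_left ..
      have hslice2 : PySem.List.slice ((D ++ L ++ [c]) ++ flatT t ++ ')' :: (flatO rest ++ S))
          (some ((D.length : Int) + (L.length : Int) + 1)) none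
          = flatT t ++ ')' :: (flatO rest ++ S) := by
        rw [show ((D.length : Int) + (L.length : Int) + 1)
            = (((D ++ L ++ [c]).length : Nat) : Int) from by push_cast; simp; try ring]
        rw [PySem.List.slice_from_natCast]
        rw [show (D ++ L ++ [c]) ++ flatT t ++ ')' :: (flatO rest ++ S)
            = (D ++ L ++ [c]) ++ (flatT t ++ ')' :: (flatO rest ++ S)) from by simp]
        exact List.drop_left ..
      rw [hslice1, hslice2]
      by_cases hEx : (flatT t).length + (flatO rest).length + S.length ≤ 1
      · -- the operator was the last character the stale length still covers: the loop exits
        have ht1 : (flatT t).length = 1 := by omega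
        obtain ⟨a, rfl⟩ : ∃ a, t = PTerm.atom a := by
          cases t with
          | atom a => exact ⟨a, rfl⟩
          | paren t0 o0 => simp [flatT] at ht1
        have hrest : rest = POps.nil := flatO_eq_nil (List.length_eq_zero_iff.mp (by omega))
        have hS : S = [] := List.length_eq_zero_iff.mp (by omega)
        subst hrest hS
        rw [solveLoop_exit adv _ _ _ _ (by
          simp only [flatO, flatT, List.length_append, List.length_cons, List.length_nil]
          push_cast
          omega)]
        rw [hG] at hres
        rw [show trO adv ('(' :: (L ++ [c] ++ trT adv (PTerm.atom a) ++ [')'])) POps.nil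
            = '(' :: (L ++ [c] ++ [a] ++ [')']) from by simp [trO, trT]] at hres
        rw [solveLoop_exit adv _ _ _ _ (by push_cast; simp)] at hres
        rw [← hres]
        congr 1
        simp [flatT, trT, flatO]
      · -- more input follows: process the raw right term, step over the inserted ')'
        rw [show (D ++ '(' :: L) ++ [c] ++ (flatT t ++ ')' :: (flatO rest ++ S))
            = (D ++ '(' :: L ++ [c]) ++ flatT t ++ (')' :: (flatO rest ++ S)) from by simp]
        rw [show (D.length : Int) + (L.length : Int) + 2
            = (((D ++ '(' :: L ++ [c]).length : Nat) : Int) from by push_cast; simp; try ring]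
        refine iht hvt (D ++ '(' :: L ++ [c]) (')' :: (flatO rest ++ S)) f1 _ r ?_ ?_ ?_
        · simp only [flatO, List.length_append, List.length_cons, List.length_nil]
          push_cast
          omega
        · omega
        obtain ⟨f3, hf3⟩ : ∃ f3, f1 - 3 * (flatT t).length = f3 + 1 :=
          ⟨f1 - 3 * (flatT t).length - 1, by omega⟩
        rw [hf3]
        rw [solveLoop_noop adv f3 _ _ _ ')'
          (by push_cast; simp; omega)
          (pyGet_at ((D ++ '(' :: L ++ [c]) ++ trT adv t) ')' (flatO rest ++ S) _ _
            (by push_cast; simp; try ring) (by simp))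
          (by rintro ⟨-, h⟩; exact absurd h (by decide))
          (by rintro (h | h) <;> exact absurd h (by decide))]
        rw [show (D ++ '(' :: L ++ [c]) ++ trT adv t ++ (')' :: (flatO rest ++ S))
            = D ++ ('(' :: (L ++ [c] ++ trT adv t ++ [')'])) ++ (flatO rest ++ S) from by simp]
        rw [show (((D ++ '(' :: L ++ [c]).length : Nat) : Int) + (((trT adv t).length : Nat) : Int) + 1
            = (D.length : Int) + ((('(' :: (L ++ [c] ++ trT adv t ++ [')'])).length : Nat) : Int)
            from by push_cast; simp; try ring]
        rw [show (((D ++ ('(' :: (L ++ [c] ++ trT adv t ++ [')'])) ++ (flatO rest ++ S)).length : Nat) : Int)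
            = (D.length : Int) + ((('(' :: (L ++ [c] ++ trT adv t ++ [')'])).length : Nat) : Int)
              + ((((flatO rest).length : Nat) : Int) + ((S.length : Nat) : Int))
            from by push_cast; simp; try ring]
        have hLP : PT ('(' :: (L ++ [c] ++ trT adv t ++ [')'])) := by
          have hBal : Bal (L ++ [c] ++ trT adv t) :=
            Bal_append (Bal_append (PT_Bal hL)
              (Bal_single c (opC_ne c hoc).1 (opC_ne c hoc).2)) ((Bal_tr adv).1 t hvt)
          have h2 := PT.paren _ hBal
          simpa using h2
        refine ihr hvr D ('(' :: (L ++ [c] ++ trT adv t ++ [')'])) S f3 r hLP ?_ ?_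
        · omega
        rw [← hG]
        exact solveLoop_mono adv _ _ _ _ _ r hres (by omega)

theorem atom_isOp_false (a : Char) (h : isAtomC a = true) : isOpC a = false := by
  simp [isAtomC] at h
  simp [isOpC]
  tauto

theorem blocks_sim (adv : Bool) : ∀ (bl : List (PTerm × POps)) (D : List Char) (f : Nat),
    validB bl = true → 3 * (flatB bl).length ≤ f →
    solveLoop adv f (D ++ flatB bl) (D.length : Int)
      ((D.length : Int) + ((flatB bl).length : Int)) = some (D ++ outB adv bl) := by
  intro bl
  induction bl with
  | nil =>
    intro D f hv hf
    rw [solveLoop_exit adv f _ _ _ (by simp [flatB])]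
    simp [outB, flatB]
  | cons p r ih =>
    obtain ⟨t, o⟩ := p
    intro D f hv hf
    rw [validB, Bool.and_eq_true, Bool.and_eq_true] at hv
    obtain ⟨⟨hvt, hvo⟩, hvr⟩ := hv
    have hlb : (flatB ((t, o) :: r)).length
        = (flatT t).length + (flatO o).length + (flatB r).length := by
      simp [flatB]
      try omega
    have hlt0 := flatT_len_pos t
    rw [hlb] at hf
    rw [show D ++ flatB ((t, o) :: r) = D ++ flatT t ++ (flatO o ++ flatB r) from by
      simp [flatB]]
    refine (A_sim adv).1 t hvt D (flatO o ++ flatB r) f _ (D ++ outB adv ((t, o) :: r)) ?_ ?_ ?_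
    · rw [hlb]; push_cast; omega
    · omega
    rw [show ((((flatO o ++ flatB r)).length : Nat) : Int)
        = (((flatO o).length : Nat) : Int) + (((flatB r).length : Nat) : Int) from by
      push_cast; simp]
    refine (A_sim adv).2 o hvo D (trT adv t) (flatB r) (f - 3 * (flatT t).length)
      (D ++ outB adv ((t, o) :: r)) (PT_trT adv t hvt) ?_ ?_
    · omega
    rw [show D ++ trO adv (trT adv t) o ++ flatB r
        = (D ++ trO adv (trT adv t) o) ++ flatB r from by simp]
    rw [show (D.length : Int) + (((trO adv (trT adv t) o).length : Nat) : Int)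
        = (((D ++ trO adv (trT adv t) o).length : Nat) : Int) from by push_cast; simp]
    have hih := ih (D ++ trO adv (trT adv t) o) (3 * (flatB r).length) hvr le_rfl
    rw [show (D ++ trO adv (trT adv t) o) ++ outB adv r = D ++ outB adv ((t, o) :: r) from by
      rw [show outB adv ((t, o) :: r) = trO adv (trT adv t) o ++ outB adv r from rfl]
      simp] at hih
    exact solveLoop_mono adv _ _ _ _ _ _ hih (by omega)

-- ===== B-side simulation =====

def BTS (adv : Bool) (t : PTerm) : Prop :=
  validT t = true → ∀ (pre suf : List Char) (f : Nat),
    (flatT t).length ≤ f →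
    parseTerm (pre ++ flatT t ++ suf) adv f pre.length
      = some (trT adv t, pre.length + (flatT t).length)

def BOS (adv : Bool) (o : POps) : Prop :=
  validO o = true → ∀ (pre done last suf : List Char) (f : Nat),
    (∀ c, suf.head? = some c → isOpC c = false) → (flatO o).length + 1 ≤ f →
    chainLoop (pre ++ flatO o ++ suf) adv f done last pre.length
      = some (done ++ trO adv last o, pre.length + (flatO o).length)

theorem B_sim (adv : Bool) : (∀ t, BTS adv t) ∧ (∀ o, BOS adv o) := by
  refine pt_po_ind (BTS adv) (BOS adv) ?_ ?_ ?_ ?_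
  · -- atom
    intro c hv pre suf f hf
    rw [validT] at hv
    simp only [flatT, List.length_cons, List.length_nil] at hf ⊢
    obtain ⟨f1, rfl⟩ : ∃ f1, f = f1 + 1 := ⟨f - 1, by omega⟩
    rw [show pre ++ [c] ++ suf = pre ++ c :: suf from by simp]
    rw [parseTerm]
    rw [if_neg (by
      rintro ⟨-, hx⟩
      rw [getElem_mid pre c suf pre.length rfl] at hx
      have : c = '(' := by injection hx
      exact (atomC_ne c hv).1 this)]
    rw [getElem_mid pre c suf pre.length rfl]
    simp [trT]
  · -- paren
    intro t0 o iht iho hv pre suf f hf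
    rw [validT, Bool.and_eq_true] at hv
    have hlT : (flatT (PTerm.paren t0 o)).length
        = (flatT t0).length + (flatO o).length + 2 := by simp [flatT]; try omega
    have hlt0 := flatT_len_pos t0
    rw [hlT] at hf
    obtain ⟨f2, rfl⟩ : ∃ f2, f = f2 + 1 + 1 := ⟨f - 2, by omega⟩
    have hflat : pre ++ flatT (PTerm.paren t0 o) ++ suf
        = pre ++ '(' :: (flatT t0 ++ flatO o ++ [')'] ++ suf) := by simp [flatT]
    rw [parseTerm]
    rw [if_pos ⟨by rw [hflat]; simp [flatT], by
      rw [hflat]; exact getElem_mid pre '(' _ _ rfl⟩]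
    rw [parseChain]
    have hterm : parseTerm (pre ++ flatT (PTerm.paren t0 o) ++ suf) adv f2 (pre.length + 1)
        = some (trT adv t0, pre.length + 1 + (flatT t0).length) := by
      have h := iht hv.1 (pre ++ ['(']) (flatO o ++ (')' :: suf)) f2 (by omega)
      rw [show (pre ++ ['(']) ++ flatT t0 ++ (flatO o ++ (')' :: suf))
          = pre ++ flatT (PTerm.paren t0 o) ++ suf from by simp [flatT]] at h
      rw [show (pre ++ ['(']).length = pre.length + 1 from by simp] at h
      exact h
    rw [hterm]
    show (match chainLoop (pre ++ flatT (PTerm.paren t0 o) ++ suf) adv f2 [] (trT adv t0)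
        (pre.length + 1 + (flatT t0).length) with
      | none => none
      | some (inner, j) => some ('(' :: (inner ++ [')']), j + 1))
      = some (trT adv (PTerm.paren t0 o),
          pre.length + (flatT (PTerm.paren t0 o)).length)
    have hchain : chainLoop (pre ++ flatT (PTerm.paren t0 o) ++ suf) adv f2 []
        (trT adv t0) (pre.length + 1 + (flatT t0).length)
        = some ([] ++ trO adv (trT adv t0) o,
            (pre.length + 1 + (flatT t0).length) + (flatO o).length) := by
      have h := iho hv.2 (pre ++ '(' :: flatT t0) [] (trT adv t0) (')' :: suf) f2
        (by intro c hc; simp at hc; rw [← hc]; decide) (by omega)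
      rw [show (pre ++ '(' :: flatT t0) ++ flatO o ++ (')' :: suf)
          = pre ++ flatT (PTerm.paren t0 o) ++ suf from by simp [flatT]] at h
      rw [show (pre ++ '(' :: flatT t0).length = pre.length + 1 + (flatT t0).length from by
        simp; try omega] at h
      exact h
    rw [hchain]
    simp only [List.nil_append, Option.some.injEq, Prod.mk.injEq]
    refine ⟨by rw [trT], by rw [hlT]; omega⟩
  · -- ops nil
    intro hv pre done last suf f hns hf
    obtain ⟨f1, rfl⟩ : ∃ f1, f = f1 + 1 := ⟨f - 1, by omega⟩
    rw [chainLoop]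
    rw [if_neg (by
      rintro ⟨hlt, hop⟩
      cases suf with
      | nil => simp [flatO] at hlt
      | cons c s2 =>
        have hgc : (pre ++ flatO POps.nil ++ (c :: s2))[pre.length]? = some c := by
          rw [show pre ++ flatO POps.nil ++ (c :: s2) = pre ++ c :: s2 from by simp [flatO]]
          exact getElem_mid pre c s2 _ rfl
        have hcop := hns c rfl
        rcases hop with h | h <;> rw [hgc] at h <;>
          (injection h with h; rw [h] at hcop; simp [isOpC] at hcop))]
    simp [trO, flatO]
  · -- ops cons
    intro c t rest iht ihr hv pre done last suf f hns hf
    rw [validO, Bool.and_eq_true, Bool.and_eq_true] at hv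
    obtain ⟨⟨hoc, hvt⟩, hvr⟩ := hv
    have h4 : c = '+' ∨ c = '*' := by simpa [isOpC] using hoc
    have hlf : (flatO (POps.cons c t rest)).length
        = (flatT t).length + (flatO rest).length + 1 := by simp [flatO]; try omega
    have hlt0 := flatT_len_pos t
    rw [hlf] at hf
    obtain ⟨f1, rfl⟩ : ∃ f1, f = f1 + 1 := ⟨f - 1, by omega⟩
    have hgc : (pre ++ flatO (POps.cons c t rest) ++ suf)[pre.length]? = some c := by
      rw [show pre ++ flatO (POps.cons c t rest) ++ suf
          = pre ++ c :: (flatT t ++ flatO rest ++ suf) from by simp [flatO]]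
      exact getElem_mid pre c _ _ rfl
    rw [chainLoop]
    rw [if_pos ⟨by simp [flatO], by
      rcases h4 with h | h
      · exact Or.inl (by rw [hgc, h])
      · exact Or.inr (by rw [hgc, h])⟩]
    rw [hgc]
    have hterm : parseTerm (pre ++ flatO (POps.cons c t rest) ++ suf) adv f1 (pre.length + 1)
        = some (trT adv t, pre.length + 1 + (flatT t).length) := by
      have h := iht hvt (pre ++ [c]) (flatO rest ++ suf) f1 (by omega)
      rw [show (pre ++ [c]) ++ flatT t ++ (flatO rest ++ suf)
          = pre ++ flatO (POps.cons c t rest) ++ suf from by simp [flatO]] at h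
      rw [show (pre ++ [c]).length = pre.length + 1 from by simp] at h
      exact h
    rw [hterm]
    show (if adv = true ∧ c = '*' then
        chainLoop (pre ++ flatO (POps.cons c t rest) ++ suf) adv f1 (done ++ last ++ ['*'])
          (trT adv t) (pre.length + 1 + (flatT t).length)
      else
        chainLoop (pre ++ flatO (POps.cons c t rest) ++ suf) adv f1 done
          ('(' :: (last ++ [c] ++ trT adv t ++ [')'])) (pre.length + 1 + (flatT t).length))
      = some (done ++ trO adv last (POps.cons c t rest),
          pre.length + (flatO (POps.cons c t rest)).length)
    by_cases hadv : adv = true ∧ c = '*'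
    · rw [if_pos hadv]
      have h := ihr hvr (pre ++ c :: flatT t) (done ++ last ++ ['*']) (trT adv t) suf f1 hns
        (by omega)
      rw [show (pre ++ c :: flatT t) ++ flatO rest ++ suf
          = pre ++ flatO (POps.cons c t rest) ++ suf from by simp [flatO]] at h
      rw [show (pre ++ c :: flatT t).length = pre.length + 1 + (flatT t).length from by
        simp; try omega] at h
      rw [h]
      rw [show trO adv last (POps.cons c t rest) = last ++ '*' :: trO adv (trT adv t) rest
        from by rw [trO, if_pos hadv]]
      rw [hlf]
      simp
      omega
    · rw [if_neg hadv]
      have h := ihr hvr (pre ++ c :: flatT t) done ('(' :: (last ++ [c] ++ trT adv t ++ [')']))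
        suf f1 hns (by omega)
      rw [show (pre ++ c :: flatT t) ++ flatO rest ++ suf
          = pre ++ flatO (POps.cons c t rest) ++ suf from by simp [flatO]] at h
      rw [show (pre ++ c :: flatT t).length = pre.length + 1 + (flatT t).length from by
        simp; try omega] at h
      rw [h]
      rw [show trO adv last (POps.cons c t rest)
          = trO adv ('(' :: (last ++ [c] ++ trT adv t ++ [')'])) rest
        from by rw [trO, if_neg hadv]]
      rw [hlf]
      simp
      omega

theorem pC_sim (adv : Bool) (t : PTerm) (o : POps) (hvt : validT t = true)
    (hvo : validO o = true) (pre suf : List Char) (f : Nat)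
    (hns : ∀ c, suf.head? = some c → isOpC c = false)
    (hf : (flatT t).length + (flatO o).length + 2 ≤ f) :
    parseChain (pre ++ (flatT t ++ flatO o) ++ suf) adv f pre.length
      = some (trO adv (trT adv t) o, pre.length + (flatT t).length + (flatO o).length) := by
  obtain ⟨f1, rfl⟩ : ∃ f1, f = f1 + 1 := ⟨f - 1, by omega⟩
  rw [parseChain]
  have hterm : parseTerm (pre ++ (flatT t ++ flatO o) ++ suf) adv f1 pre.length
      = some (trT adv t, pre.length + (flatT t).length) := by
    have h := (B_sim adv).1 t hvt pre (flatO o ++ suf) f1 (by omega)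
    rw [show pre ++ flatT t ++ (flatO o ++ suf)
        = pre ++ (flatT t ++ flatO o) ++ suf from by simp] at h
    exact h
  rw [hterm]
  show chainLoop (pre ++ (flatT t ++ flatO o) ++ suf) adv f1 [] (trT adv t)
      (pre.length + (flatT t).length)
    = some (trO adv (trT adv t) o, pre.length + (flatT t).length + (flatO o).length)
  have h := (B_sim adv).2 o hvo (pre ++ flatT t) [] (trT adv t) suf f1 hns (by omega)
  rw [show (pre ++ flatT t) ++ flatO o ++ suf
      = pre ++ (flatT t ++ flatO o) ++ suf from by simp] at h
  rw [show (pre ++ flatT t).length = pre.length + (flatT t).length from by simp] at h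
  rw [h]
  simp

theorem head_flatB_not_op : ∀ (bl : List (PTerm × POps)), validB bl = true →
    ∀ c, (flatB bl).head? = some c → isOpC c = false := by
  intro bl hv c hc
  cases bl with
  | nil => simp [flatB] at hc
  | cons p r =>
    obtain ⟨t, o⟩ := p
    rw [validB, Bool.and_eq_true, Bool.and_eq_true] at hv
    cases t with
    | atom a =>
      rw [show flatB ((PTerm.atom a, o) :: r) = a :: (flatO o ++ flatB r) from by
        simp [flatB, flatT]] at hc
      simp at hc
      rw [← hc]
      have ha : isAtomC a = true := by
        have := hv.1.1
        rwa [validT] at this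
      exact atom_isOp_false a ha
    | paren t0 o0 =>
      rw [show flatB ((PTerm.paren t0 o0, o) :: r)
          = '(' :: (flatT t0 ++ flatO o0 ++ [')'] ++ (flatO o ++ flatB r)) from by
        simp [flatB, flatT]] at hc
      simp at hc
      rw [← hc]
      decide

theorem blocks_len_le : ∀ bl : List (PTerm × POps), bl.length ≤ (flatB bl).length := by
  intro bl
  induction bl with
  | nil => simp [flatB]
  | cons p r ih =>
    obtain ⟨t, o⟩ := p
    have := flatT_len_pos t
    simp [flatB]
    omega

theorem altLoop_sim (adv : Bool) : ∀ (bl : List (PTerm × POps)) (pre acc : List Char) (f : Nat),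
    validB bl = true → bl.length + 1 ≤ f →
    solveAltLoop (pre ++ flatB bl) adv f acc pre.length = some (acc ++ outB adv bl) := by
  intro bl
  induction bl with
  | nil =>
    intro pre acc f hv hf
    obtain ⟨f1, rfl⟩ : ∃ f1, f = f1 + 1 := ⟨f - 1, by omega⟩
    rw [solveAltLoop]
    rw [if_neg (by simp [flatB])]
    simp [outB, flatB]
  | cons p r ih =>
    obtain ⟨t, o⟩ := p
    intro pre acc f hv hf
    rw [validB, Bool.and_eq_true, Bool.and_eq_true] at hv
    obtain ⟨⟨hvt, hvo⟩, hvr⟩ := hv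
    have hlt0 := flatT_len_pos t
    simp only [List.length_cons] at hf
    obtain ⟨f1, rfl⟩ : ∃ f1, f = f1 + 1 := ⟨f - 1, by omega⟩
    rw [solveAltLoop]
    rw [if_pos (by simp [flatB]; omega)]
    have hchain := pC_sim adv t o hvt hvo pre (flatB r)
      (2 * (pre ++ flatB ((t, o) :: r)).length + 4)
      (head_flatB_not_op r hvr)
      (by simp only [flatB, List.length_append]; omega)
    rw [show pre ++ (flatT t ++ flatO o) ++ flatB r
        = pre ++ flatB ((t, o) :: r) from by simp [flatB]] at hchain
    rw [hchain]
    show solveAltLoop (pre ++ flatB ((t, o) :: r)) adv f1 (acc ++ trO adv (trT adv t) o)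
        (pre.length + (flatT t).length + (flatO o).length) = some (acc ++ outB adv ((t, o) :: r))
    have h := ih (pre ++ (flatT t ++ flatO o)) (acc ++ trO adv (trT adv t) o) f1 hvr (by omega)
    rw [show (pre ++ (flatT t ++ flatO o)) ++ flatB r
        = pre ++ flatB ((t, o) :: r) from by simp [flatB]] at h
    rw [show (pre ++ (flatT t ++ flatO o)).length
        = pre.length + (flatT t).length + (flatO o).length from by simp; try omega] at h
    rw [h]
    rw [show outB adv ((t, o) :: r) = trO adv (trT adv t) o ++ outB adv r from rfl]
    simp

-- ===== VERDICT (by name: the statement is the Claim_ definition above) =====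
theorem solve_spec : Claim_equal_solve := by
  unfold Claim_equal_solve
  intro e adv _ hpre
  unfold Spec_solve
  rcases hpre with hnil | hchk
  · unfold solve solve_alt
    rw [hnil]
    rfl
  · obtain ⟨bl, hfl, hvb⟩ := pre_decomp _ hchk
    have hA : solve e adv = String.ofList (outB adv bl) := by
      unfold solve
      rw [hfl]
      rw [show flatB bl = ([] : List Char) ++ flatB bl from by simp]
      rw [show (0 : Int) = ((([] : List Char).length : Nat) : Int) from by simp]
      rw [show (((([] : List Char) ++ flatB bl).length : Nat) : Int)
          = (((([] : List Char)).length : Nat) : Int) + (((flatB bl).length : Nat) : Int)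
          from by simp]
      rw [blocks_sim adv bl [] _ hvb (by simp)]
      simp
    have hB : solve_alt e adv = String.ofList (outB adv bl) := by
      unfold solve_alt
      rw [hfl]
      have h := altLoop_sim adv bl [] [] ((flatB bl).length + 1) hvb
        (by have := blocks_len_le bl; omega)
      rw [show ([] : List Char) ++ flatB bl = flatB bl from by simp] at h
      rw [show ([] : List Char).length = 0 from rfl] at h
      rw [h]
      simp
    rw [hA, hB]
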